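-- pv_equiv track=rewrite | github.com/kimphuong2104/tachcode1 | cs/cadbase/wsutils/stringutils.py | getMultiLanguagePair
-- ===== SOURCE A (Python) =====
-- def getMultiLanguagePair(lang, colHeadStr):
--     """
--     Zerlegt ein colHeadStr in seine Bestandteile und gibt
--     fuer die aktuelle Sprache den Titel zurueck
--     Jeder Eintrag on der Liste besteht aus einem String
--     <Sprache1>@<Bezeichnung1>@<Sprache n>@<Bezeichnung n>:<cdb-attribut>.
--
--     Beinhaltet der String kein ":" wird der String
--     als Attributname betrachtet. Wird die aktuelle Sprache nicht gefunden,
--     dann wird die erste im String stehende Sprache verwendet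
--
--     :returns tuple (colTitle,cdbAttr)
--     """
--     cdbCol = colHeadStr
--     colTitle = None
--     if ":" in colHeadStr:
--         tmpList = colHeadStr.split(":")
--         if len(tmpList) == 2:
--             langPart = tmpList[0]
--             cdbCol = tmpList[1]
--             langList = langPart.split("@")
--             i = 0
--             langListLen = len(langList) - 1
--             while i < langListLen:
--                 line = langList[i]
--                 v = langList[i + 1]
--                 if line == lang:
--                     colTitle = v
--                     break
--                 else:
--                     i += 2
--             # Wenn Sprache nicht gefunden, dann die erste nehmen
--             if colTitle is None and langListLen > 1:
--                 colTitle = langList[1]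
--     if colTitle is None:
--         # Wenn keine Sprache vorhanden, dann das Attribut nehmen
--         colTitle = cdbCol
--     return colTitle, cdbCol
-- ===== SOURCE B (Python) =====
-- def getMultiLanguagePair(lang, colHeadStr):
--     """Alternative decomposition: early-return guards, then stride-slice the
--     language part into parallel key/value lists and use list.index for the
--     first matching complete pair."""
--     if ":" not in colHeadStr:
--         return colHeadStr, colHeadStr
--     parts = colHeadStr.split(":")
--     if len(parts) != 2:
--         return colHeadStr, colHeadStr
--     head, attr = parts
--     langList = head.split("@")
--     vals = langList[1::2]
--     keys = langList[0::2][:len(vals)]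
--     if lang in keys:
--         title = vals[keys.index(lang)]
--     elif len(langList) > 2:
--         title = langList[1]
--     else:
--         title = attr
--     return title, attr
-- ===== Notes on version B (the rewrite author's own statement) =====
-- stated objective: alternative
-- what changed: Replaces A's index-stepping while-loop scan-with-break by early-return guards plus stride-slicing the language part into parallel key and value lists (langList[0::2]/langList[1::2]) and a single list.index lookup for the first matching complete pair.
import Mathlib
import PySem

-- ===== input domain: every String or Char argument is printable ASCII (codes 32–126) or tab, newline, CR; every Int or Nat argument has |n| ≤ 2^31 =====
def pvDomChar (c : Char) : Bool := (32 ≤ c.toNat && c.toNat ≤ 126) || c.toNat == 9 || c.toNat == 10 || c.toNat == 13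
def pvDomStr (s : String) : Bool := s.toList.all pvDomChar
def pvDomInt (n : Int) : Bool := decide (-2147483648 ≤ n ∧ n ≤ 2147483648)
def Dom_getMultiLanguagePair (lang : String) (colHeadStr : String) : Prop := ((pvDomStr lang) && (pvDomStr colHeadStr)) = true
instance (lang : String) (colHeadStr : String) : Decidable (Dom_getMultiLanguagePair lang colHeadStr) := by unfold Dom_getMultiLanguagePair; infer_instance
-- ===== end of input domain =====

-- B replaces A's index-stepping while-loop scan by early-return guards plus stride-slicing the language part into parallel key/value lists and one list.index lookup (alternative decomposition; return value only).


-- ===== PORT A =====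
-- A's while loop: i steps by 2 while i < len(langList)-1; langList[i]/langList[i+1] are
-- always in range there, so List.getD with a dummy default is exact.
def pvWhileA (lang : String) (langList : List String) (i : Nat) : Option String :=
  if i < langList.length - 1 then
    let line := langList.getD i ""
    let v := langList.getD (i + 1) ""
    if line = lang then some v
    else pvWhileA lang langList (i + 2)
  else none
termination_by langList.length - i
decreasing_by omega

def getMultiLanguagePair (lang : String) (colHeadStr : String) : String × String :=
  let cdbCol := colHeadStr
  if PySem.Str.isIn ":" colHeadStr then
    let tmpList := (PySem.Str.split? colHeadStr ":").getD []   -- ":" ≠ "", split? is some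
    if tmpList.length = 2 then
      let langPart := tmpList.getD 0 ""
      let cdbCol := tmpList.getD 1 ""
      let langList := (PySem.Str.split? langPart "@").getD []  -- "@" ≠ ""
      let colTitle := pvWhileA lang langList 0
      let colTitle := if colTitle = none ∧ langList.length - 1 > 1
                      then some (langList.getD 1 "") else colTitle
      (colTitle.getD cdbCol, cdbCol)
    else (cdbCol, cdbCol)
  else (cdbCol, cdbCol)

-- ===== PORT B =====
def getMultiLanguagePair_alt (lang : String) (colHeadStr : String) : String × String :=
  if !(PySem.Str.isIn ":" colHeadStr) then (colHeadStr, colHeadStr)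
  else
    let parts := (PySem.Str.split? colHeadStr ":").getD []   -- ":" ≠ ""
    if parts.length ≠ 2 then (colHeadStr, colHeadStr)
    else
      let head := parts.getD 0 ""
      let attr := parts.getD 1 ""
      let langList := (PySem.Str.split? head "@").getD []    -- "@" ≠ ""
      let vals := (PySem.List.slice? langList (some 1) none 2).getD []   -- langList[1::2], step 2 ≠ 0
      let keys := PySem.List.slice ((PySem.List.slice? langList (some 0) none 2).getD []) none (some (vals.length : Int))  -- langList[0::2][:len(vals)]
      if lang ∈ keys then
        -- keys.index(lang) < len(keys) ≤ len(vals): the index is in range, getD is exact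
        (vals.getD ((PySem.List.index? keys lang).getD 0) "", attr)
      else if langList.length > 2 then (langList.getD 1 "", attr)
      else (attr, attr)

-- ===== PRECONDITION & SPEC =====
def Spec_getMultiLanguagePair (lang : String) (colHeadStr : String) (out : String × String) : Prop := out = getMultiLanguagePair_alt lang colHeadStr
instance (lang : String) (colHeadStr : String) (out : String × String) : Decidable (Spec_getMultiLanguagePair lang colHeadStr out) := by unfold Spec_getMultiLanguagePair; infer_instance

-- ===== CLAIM (what is proved, stated in full; the proofs are below) =====
def Claim_equal_getMultiLanguagePair : Prop := ∀ (lang : String) (colHeadStr : String), Dom_getMultiLanguagePair lang colHeadStr → Spec_getMultiLanguagePair lang colHeadStr (getMultiLanguagePair lang colHeadStr)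

-- ===== LEMMAS AND PROOFS =====

-- consecutive pairs of a list, and the first match among them: the common
-- characterisation both programs are reduced to
def pvPairUp {α : Type} : List α → List (α × α)
  | a :: b :: rest => (a, b) :: pvPairUp rest
  | _ => []

def pvFind (lang : String) : List (String × String) → Option String
  | [] => none
  | (a, b) :: r => if a = lang then some b else pvFind lang r

-- even- and odd-position elements (what the stride-2 slices compute)
def pvEvens {α : Type} : List α → List α
  | [] => []
  | [a] => [a]
  | a :: _ :: r => a :: pvEvens r

def pvOdds {α : Type} : List α → List α
  | _ :: b :: r => b :: pvOdds r
  | _ => []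

theorem pvGetD_two (a b d : String) (r : List String) (i : Nat) :
    (a :: b :: r).getD (i + 2) d = r.getD i d := by
  simp [List.getD]

-- A's loop shifted past one pair
theorem pvWhileA_shift (lang a b : String) (rest : List String) (i : Nat) :
    pvWhileA lang (a :: b :: rest) (i + 2) = pvWhileA lang rest i := by
  conv_lhs => rw [pvWhileA]
  conv_rhs => rw [pvWhileA]
  have hiff : (i + 2 < (a :: b :: rest).length - 1) = (i < rest.length - 1) := by
    simp only [List.length_cons, eq_iff_iff]; omega
  have h3 : i + 2 + 1 = (i + 1) + 2 := by omega
  simp only [hiff, h3, pvGetD_two]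
  by_cases h : i < rest.length - 1
  · simp only [if_pos h]
    split
    · rfl
    · exact pvWhileA_shift lang a b rest (i + 2)
  · simp only [if_neg h]
termination_by rest.length - i
decreasing_by omega

theorem pvWhileA_eq_find (lang : String) (l : List String) :
    pvWhileA lang l 0 = pvFind lang (pvPairUp l) := by
  match l with
  | [] => rw [pvWhileA]; simp [pvPairUp, pvFind]
  | [a] => rw [pvWhileA]; simp [pvPairUp, pvFind]
  | a :: b :: rest =>
    rw [pvWhileA]
    have h : 0 < (a :: b :: rest).length - 1 := by
      simp only [List.length_cons]; omega
    simp only [if_pos h, List.getD_cons_zero, List.getD_cons_succ, pvPairUp, pvFind]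
    split
    · rfl
    · have hs := pvWhileA_shift lang a b rest 0
      simp only [Nat.zero_add] at hs
      rw [hs, pvWhileA_eq_find lang rest]
termination_by l.length

-- the stride-2 slices are exactly the odd-/even-position elements
theorem pvFilterMap_odds {α : Type} (l : List α) :
    List.filterMap (fun k => l[1 + 2 * k]?) (List.range (l.length / 2)) = pvOdds l := by
  match l with
  | [] => simp [pvOdds]
  | [a] => simp [pvOdds]
  | a :: b :: r =>
    have hlen : (a :: b :: r).length / 2 = r.length / 2 + 1 := by
      simp only [List.length_cons]; omega
    rw [hlen, List.range_succ_eq_map]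
    simp only [List.filterMap_cons, List.filterMap_map]
    have h0 : (a :: b :: r)[1 + 2 * 0]? = some b := by simp
    have hstep : ∀ k : Nat, (a :: b :: r)[1 + 2 * (k + 1)]? = r[1 + 2 * k]? := by
      intro k
      have : 1 + 2 * (k + 1) = (1 + 2 * k) + 2 := by omega
      simp [this]
    simp only [Nat.mul_zero, Nat.add_zero] at h0 ⊢
    rw [show (a :: b :: r)[1]? = some b by simp]
    simp only [Function.comp]
    have : List.filterMap (fun k => (a :: b :: r)[1 + 2 * (k + 1)]?) (List.range (r.length / 2))
        = List.filterMap (fun k => r[1 + 2 * k]?) (List.range (r.length / 2)) := by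
      apply List.filterMap_congr
      intro k _; exact hstep k
    rw [this, pvFilterMap_odds r]
    simp [pvOdds]
termination_by l.length

theorem pvFilterMap_evens {α : Type} (l : List α) :
    List.filterMap (fun k => l[2 * k]?) (List.range ((l.length + 1) / 2)) = pvEvens l := by
  match l with
  | [] => simp [pvEvens]
  | [a] => simp [pvEvens]
  | a :: b :: r =>
    have hlen : ((a :: b :: r).length + 1) / 2 = (r.length + 1) / 2 + 1 := by
      simp only [List.length_cons]; omega
    rw [hlen, List.range_succ_eq_map]
    simp only [List.filterMap_cons, List.filterMap_map]
    rw [show (a :: b :: r)[2 * 0]? = some a by simp]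
    simp only [Function.comp]
    have : List.filterMap (fun k => (a :: b :: r)[2 * (k + 1)]?) (List.range ((r.length + 1) / 2))
        = List.filterMap (fun k => r[2 * k]?) (List.range ((r.length + 1) / 2)) := by
      apply List.filterMap_congr
      intro k _
      have : 2 * (k + 1) = (2 * k) + 2 := by omega
      simp [this]
    rw [this, pvFilterMap_evens r]
    simp [pvEvens]
termination_by l.length

theorem pvSlice_odds {α : Type} (l : List α) :
    (PySem.List.slice? l (some 1) none 2).getD [] = pvOdds l := by
  unfold PySem.List.slice? PySem.List.sliceIndices
  simp only [if_neg (by norm_num : (2 : Int) ≠ 0)]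
  match l with
  | [] => simp [pvOdds]
  | x :: t =>
    have hn : (x :: t).length = t.length + 1 := by simp
    have h1 : ¬ ((2 : Int) < 0) := by norm_num
    simp only [h1, if_false, if_neg (by norm_num : ¬ ((1:Int) < 0))]
    have hmin : min (1 : Int) ((x :: t).length : Int) = 1 := by
      rw [hn]; push_cast; omega
    rw [hmin]
    have hcount : (if (1 : Int) < ((x :: t).length : Int) then
        (((((x :: t).length : Int) - 1 + 2 - 1) / 2)).toNat else 0) = (x :: t).length / 2 := by
      rw [hn]; push_cast
      by_cases h : (1 : Int) < (t.length : Int) + 1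
      · rw [if_pos h]
        omega
      · rw [if_neg h]
        omega
    simp only [if_pos (by norm_num : (0:Int) < 2)]
    rw [hcount]
    simp only [Option.getD_some]
    have harg : ∀ k : Nat, ((1 : Int) + 2 * (k : Int)).toNat = 1 + 2 * k := by
      intro k; omega
    have hcg : List.filterMap (fun k : Nat => (x :: t)[((1 : Int) + 2 * (k : Int)).toNat]?) (List.range ((x :: t).length / 2))
        = List.filterMap (fun k : Nat => (x :: t)[1 + 2 * k]?) (List.range ((x :: t).length / 2)) :=
      List.filterMap_congr (fun k _ => by rw [harg k])
    rw [hcg, pvFilterMap_odds]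

theorem pvSlice_evens {α : Type} (l : List α) :
    (PySem.List.slice? l (some 0) none 2).getD [] = pvEvens l := by
  unfold PySem.List.slice? PySem.List.sliceIndices
  simp only [if_neg (by norm_num : (2 : Int) ≠ 0)]
  have h1 : ¬ ((2 : Int) < 0) := by norm_num
  simp only [h1, if_false, if_neg (by norm_num : ¬ ((0:Int) < 0))]
  have hmin : min (0 : Int) (l.length : Int) = 0 := by
    have : (0 : Int) ≤ (l.length : Int) := by positivity
    omega
  rw [hmin]
  have hcount : (if (0 : Int) < (l.length : Int) then
      ((((l.length : Int) - 0 + 2 - 1) / 2)).toNat else 0) = (l.length + 1) / 2 := by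
    by_cases h : (0 : Int) < (l.length : Int)
    · rw [if_pos h]; omega
    · rw [if_neg h]; omega
  simp only [if_pos (by norm_num : (0:Int) < 2)]
  rw [hcount]
  simp only [Option.getD_some]
  have hcg : List.filterMap (fun k : Nat => l[((0 : Int) + 2 * (k : Int)).toNat]?) (List.range ((l.length + 1) / 2))
      = List.filterMap (fun k : Nat => l[2 * k]?) (List.range ((l.length + 1) / 2)) :=
    List.filterMap_congr (fun k _ => by rw [show ((0 : Int) + 2 * (k : Int)).toNat = 2 * k by omega])
  rw [hcg, pvFilterMap_evens]

theorem pvOdds_map (l : List String) : pvOdds l = (pvPairUp l).map Prod.snd := by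
  match l with
  | [] => simp [pvOdds, pvPairUp]
  | [a] => simp [pvOdds, pvPairUp]
  | a :: b :: r => simp [pvOdds, pvPairUp, pvOdds_map r]
termination_by l.length

theorem pvEvens_take (l : List String) :
    (pvEvens l).take (pvOdds l).length = (pvPairUp l).map Prod.fst := by
  match l with
  | [] => simp [pvEvens, pvOdds, pvPairUp]
  | [a] => simp [pvEvens, pvOdds, pvPairUp]
  | a :: b :: r => simp [pvEvens, pvOdds, pvPairUp, pvEvens_take r]
termination_by l.length

-- the index lookup on the parallel lists is the first pair match
theorem pvLookup_eq_find (lang : String) (pairs : List (String × String)) :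
    (if lang ∈ pairs.map Prod.fst then
       some ((pairs.map Prod.snd).getD ((PySem.List.index? (pairs.map Prod.fst) lang).getD 0) "")
     else none) = pvFind lang pairs := by
  induction pairs with
  | nil => simp [pvFind]
  | cons p r ih =>
    obtain ⟨a, b⟩ := p
    simp only [List.map_cons, pvFind]
    by_cases ha : a = lang
    · subst ha
      rw [PySem.List.index?_cons_self]
      simp
    · rw [PySem.List.index?_cons_of_ne _ ha]
      by_cases hm : lang ∈ r.map Prod.fst
      · obtain ⟨k, hk⟩ := Option.isSome_iff_exists.mp ((PySem.List.index?_isSome_iff _ _).mpr hm)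
        rw [hk] at ih ⊢
        simp only [List.mem_cons, hm, or_true, if_pos, Option.map_some, Option.getD_some,
          List.getD_cons_succ]
        rw [if_neg ha]
        simpa [hm] using ih
      · have hmem : lang ∉ (a :: r.map Prod.fst) := by
          intro hc
          rcases List.mem_cons.mp hc with h | h
          · exact ha h.symm
          · exact hm h
        rw [if_neg hmem, if_neg ha]
        simpa [hm] using ih

-- ===== VERDICT (by name: the statement is the Claim_ definition above) =====
theorem getMultiLanguagePair_spec : Claim_equal_getMultiLanguagePair := by
  intro lang colHeadStr _
  unfold Spec_getMultiLanguagePair getMultiLanguagePair getMultiLanguagePair_alt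
  by_cases h1 : PySem.Str.isIn ":" colHeadStr = true
  · simp only [h1, Bool.not_true, Bool.false_eq_true, if_false, if_true]
    by_cases h2 : ((PySem.Str.split? colHeadStr ":").getD []).length = 2
    · simp only [if_pos h2, if_neg (by simpa using h2 : ¬ ((PySem.Str.split? colHeadStr ":").getD []).length ≠ 2)]
      set langList := (PySem.Str.split? (((PySem.Str.split? colHeadStr ":").getD []).getD 0 "") "@").getD [] with hl
      rw [pvWhileA_eq_find, pvSlice_odds, pvSlice_evens, PySem.List.slice_to_natCast,
        pvEvens_take, pvOdds_map]
      have hfind := pvLookup_eq_find lang (pvPairUp langList)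
      by_cases hm : lang ∈ (pvPairUp langList).map Prod.fst
      · rw [if_pos hm] at hfind
        rw [if_pos hm, ← hfind]
        simp
      · rw [if_neg hm] at hfind
        rw [if_neg hm, ← hfind]
        have hiff : (langList.length - 1 > 1) ↔ (langList.length > 2) := by omega
        simp only [true_and, hiff]
        by_cases hlen : langList.length > 2
        · simp [hlen]
        · simp [hlen]
    · simp only [if_neg h2, if_pos (by simpa using h2 : ((PySem.Str.split? colHeadStr ":").getD []).length ≠ 2)]
  · simp only [Bool.not_eq_true] at h1
    simp only [h1, Bool.not_false, Bool.false_eq_true, if_false, if_true]
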